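-- pv_equiv track=rewrite | github.com/cutyrei/project-euler | p043_Sub-string divisibility.py | fin_num
-- ===== SOURCE A (Python) =====
-- def fin_num(r):
--     src = r
--     results = []
--     for s in src:
--         for i in range(1, 10):
--             if str(i) in s: continue
--             results.append(int(str(i)+s))
--     return sum(results)
-- ===== SOURCE B (Python) =====
-- def fin_num(r):
--     # Group identical strings with a frequency dict; each distinct string is
--     # processed once (missing digits by set difference) and weighted by its count.
--     counts = {}
--     for s in r:
--         counts[s] = counts.get(s, 0) + 1
--     total = 0
--     for s, m in counts.items():
--         missing = set('123456789') - set(s)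
--         total += m * sum(int(d + s) for d in missing)
--     return total
-- ===== Notes on version B (the rewrite author's own statement) =====
-- stated objective: alternative
-- what changed: B builds a frequency dict grouping equal strings, computes each distinct string's contribution once (its missing digits found by set difference instead of nine membership tests, summed directly with no intermediate results list) and weights it by the string's multiplicity, whereas A redoes the full 9-digit scan-and-append for every occurrence.
import Mathlib
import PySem

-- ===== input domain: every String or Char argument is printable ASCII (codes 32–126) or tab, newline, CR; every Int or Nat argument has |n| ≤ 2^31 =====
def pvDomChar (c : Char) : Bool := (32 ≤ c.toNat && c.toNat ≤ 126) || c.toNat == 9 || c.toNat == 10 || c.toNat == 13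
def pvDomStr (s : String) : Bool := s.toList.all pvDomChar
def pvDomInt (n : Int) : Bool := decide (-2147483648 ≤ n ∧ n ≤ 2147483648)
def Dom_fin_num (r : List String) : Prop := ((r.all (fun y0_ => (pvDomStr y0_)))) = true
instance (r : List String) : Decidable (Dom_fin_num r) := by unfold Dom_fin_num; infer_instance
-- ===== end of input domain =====

-- B groups equal strings with a frequency dict and processes each DISTINCT string once
-- (missing digits by set difference, weighted by multiplicity); A re-runs the 9-digit
-- scan for every occurrence and collects all values in a list before summing.

-- ===== PORT A =====
def fin_num (r : List String) : Int :=
  let src := r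
  let results : List Int :=
    src.foldl
      (fun results s =>
        (PySem.List.pyRange 1 10 1).foldl
          (fun results i =>
            if PySem.Chars.isIn (PySem.Int.toChars i) s.toList then results
            else results ++ [(PySem.Int.ofChars? (PySem.Int.toChars i ++ s.toList)).getD 0])
          results)
      []
  results.sum

-- ===== PORT B =====
def fin_num_alt (r : List String) : Int :=
  let counts : PySem.Dict String Int :=
    r.foldl (fun d s => d.insert s (d.getD s 0 + 1)) PySem.Dict.empty
  counts.items.foldl
    (fun total p =>
      total + p.2 *
        ((PySem.Set.diff
            (PySem.Set.ofList (['1', '2', '3', '4', '5', '6', '7', '8', '9'] : List Char))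
            (PySem.Set.ofList p.1.toList)).foldl
          (fun acc d => acc + (PySem.Int.ofChars? (d :: p.1.toList)).getD 0) 0))
    0

-- ===== PRECONDITION & SPEC =====
-- Pre_ = exactly the inputs on which A's int() calls all succeed: each string either contains
-- every digit 1–9 (so no int() is attempted for it) or is int-parseable once a digit is
-- prepended ('1'+s parses iff d+s parses for any digit d); elsewhere Python A raises ValueError.
def Pre_fin_num (r : List String) : Prop :=
  ∀ s ∈ r,
    ((['1', '2', '3', '4', '5', '6', '7', '8', '9'] : List Char).all
        (fun d => PySem.Chars.isIn [d] s.toList)) = true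
    ∨ (PySem.Int.ofChars? ('1' :: s.toList)).isSome = true
instance (r : List String) : Decidable (Pre_fin_num r) := by unfold Pre_fin_num; infer_instance
def pvWitness_fin_num : List String := ["5", ""]

def Spec_fin_num (r : List String) (out : Int) : Prop := out = fin_num_alt r
instance (r : List String) (out : Int) : Decidable (Spec_fin_num r out) := by unfold Spec_fin_num; infer_instance

-- ===== CLAIM (what is proved, stated in full; the proofs are below) =====
def Claim_equal_fin_num : Prop := ∀ (r : List String), Dom_fin_num r → Pre_fin_num r → Spec_fin_num r (fin_num r)

-- ===== LEMMAS AND PROOFS =====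

-- the per-(digit, string) contribution both programs sum
def pvTerm (d : Char) (s : String) : Int :=
  if PySem.Chars.isIn [d] s.toList then 0
  else (PySem.Int.ofChars? (d :: s.toList)).getD 0

-- the per-string contribution (the nine digits' terms)
def pvF (s : String) : Int :=
  pvTerm '1' s + (pvTerm '2' s + (pvTerm '3' s + (pvTerm '4' s + (pvTerm '5' s +
    (pvTerm '6' s + (pvTerm '7' s + (pvTerm '8' s + pvTerm '9' s)))))))

-- summing a filtered-and-mapped list is summing the 0-padded pointwise terms
theorem pv_sum_filter_map {α : Type} (p : α → Bool) (f : α → Int) (l : List α) :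
    ((l.filter p).map f).sum = (l.map fun x => if p x then f x else 0).sum := by
  induction l with
  | nil => rfl
  | cons a l ih =>
    by_cases h : p a = true <;> simp [h, ih]

-- A's inner loop over the nine digits, as a list of appended terms
theorem pv_inner_A (s : String) (res : List Int) :
    (PySem.List.pyRange 1 10 1).foldl
      (fun results i =>
        if PySem.Chars.isIn (PySem.Int.toChars i) s.toList then results
        else results ++ [(PySem.Int.ofChars? (PySem.Int.toChars i ++ s.toList)).getD 0])
      res
    = res ++ ((PySem.List.pyRange 1 10 1).filter
        (fun i => !PySem.Chars.isIn (PySem.Int.toChars i) s.toList)).map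
        (fun i => (PySem.Int.ofChars? (PySem.Int.toChars i ++ s.toList)).getD 0) := by
  rw [PySem.List.foldl_congr_mem
      (g := fun results i =>
        if !PySem.Chars.isIn (PySem.Int.toChars i) s.toList then
          results ++ [(PySem.Int.ofChars? (PySem.Int.toChars i ++ s.toList)).getD 0]
        else results)]
  · exact PySem.List.foldl_append_if _ _ _ _
  · intro acc x _
    by_cases h : PySem.Chars.isIn (PySem.Int.toChars x) s.toList = true <;> simp [h]

-- per string, A's appended terms sum to pvF
theorem pv_per_string (s : String) :
    (((PySem.List.pyRange 1 10 1).filter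
        (fun i => !PySem.Chars.isIn (PySem.Int.toChars i) s.toList)).map
        (fun i => (PySem.Int.ofChars? (PySem.Int.toChars i ++ s.toList)).getD 0)).sum
    = pvF s := by
  rw [pv_sum_filter_map]
  have hR : PySem.List.pyRange 1 10 1 = [1, 2, 3, 4, 5, 6, 7, 8, 9] := by decide
  have h1 : PySem.Int.toChars 1 = ['1'] := by decide
  have h2 : PySem.Int.toChars 2 = ['2'] := by decide
  have h3 : PySem.Int.toChars 3 = ['3'] := by decide
  have h4 : PySem.Int.toChars 4 = ['4'] := by decide
  have h5 : PySem.Int.toChars 5 = ['5'] := by decide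
  have h6 : PySem.Int.toChars 6 = ['6'] := by decide
  have h7 : PySem.Int.toChars 7 = ['7'] := by decide
  have h8 : PySem.Int.toChars 8 = ['8'] := by decide
  have h9 : PySem.Int.toChars 9 = ['9'] := by decide
  simp only [hR, List.map_cons, List.map_nil, List.sum_cons, List.sum_nil,
    h1, h2, h3, h4, h5, h6, h7, h8, h9, List.singleton_append, pvF, pvTerm]
  have flip : ∀ (c : Bool) (x : Int), (if (!c) = true then x else 0) = (if c = true then 0 else x) := by
    intro c x; cases c <;> simp
  simp only [flip, add_zero]

-- A's value, as the list sum of per-string contributions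
theorem pv_A_eq (r : List String) :
    fin_num r = (r.map pvF).sum := by
  unfold fin_num
  simp only
  rw [PySem.List.foldl_congr_mem
      (g := fun results s =>
        results ++ ((PySem.List.pyRange 1 10 1).filter
          (fun i => !PySem.Chars.isIn (PySem.Int.toChars i) s.toList)).map
          (fun i => (PySem.Int.ofChars? (PySem.Int.toChars i ++ s.toList)).getD 0))]
  · rw [PySem.List.foldl_append_eq_flatMap]
    rw [List.nil_append, List.flatMap_def, List.sum_flatten, List.map_map]
    congr 1
    apply List.map_congr_left
    intro s _
    exact pv_per_string s
  · intro acc s _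
    exact pv_inner_A s acc

-- the singleton-substring test is membership
theorem pv_isIn_singleton (d : Char) (l : List Char) :
    PySem.Chars.isIn [d] l = true ↔ d ∈ l := by
  rw [PySem.Chars.isIn_iff_infix]
  exact List.singleton_infix_iff d l

-- B's set difference is the filter of the nine digit characters
theorem pv_diff_eq_filter (s : String) :
    PySem.Set.diff
      (PySem.Set.ofList (['1', '2', '3', '4', '5', '6', '7', '8', '9'] : List Char))
      (PySem.Set.ofList s.toList)
    = (['1', '2', '3', '4', '5', '6', '7', '8', '9'] : List Char).filter
        (fun d => !PySem.Chars.isIn [d] s.toList) := by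
  have h9 : PySem.Set.ofList (['1', '2', '3', '4', '5', '6', '7', '8', '9'] : List Char)
      = ['1', '2', '3', '4', '5', '6', '7', '8', '9'] := by decide
  rw [PySem.Set.diff, h9]
  apply List.filter_congr
  intro d _
  have hc : (PySem.Set.ofList s.toList).contains d = true ↔ d ∈ s.toList := by
    constructor
    · intro h
      exact (PySem.Set.mem_ofList s.toList d).mp (by simpa using h)
    · intro h
      simpa using (PySem.Set.mem_ofList s.toList d).mpr h
  by_cases h : d ∈ s.toList
  · simp [(pv_isIn_singleton d s.toList).mpr h]
    exact h
  · have h1 : (PySem.Set.ofList s.toList).contains d = false := by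
      cases hcv : (PySem.Set.ofList s.toList).contains d
      · rfl
      · exact absurd (hc.mp hcv) h
    have h2 : PySem.Chars.isIn [d] s.toList = false := by
      cases hiv : PySem.Chars.isIn [d] s.toList
      · rfl
      · exact absurd ((pv_isIn_singleton d s.toList).mp hiv) h
    simp [h2]
    exact h

-- B's per-string sum over missing digits equals pvF
theorem pv_inner_B (s : String) :
    ((PySem.Set.diff
        (PySem.Set.ofList (['1', '2', '3', '4', '5', '6', '7', '8', '9'] : List Char))
        (PySem.Set.ofList s.toList)).foldl
      (fun acc d => acc + (PySem.Int.ofChars? (d :: s.toList)).getD 0) 0)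
    = pvF s := by
  rw [pv_diff_eq_filter, PySem.List.foldl_add, zero_add, pv_sum_filter_map]
  simp only [List.map_cons, List.map_nil, List.sum_cons, List.sum_nil, pvF, pvTerm]
  have flip : ∀ (c : Bool) (x : Int), (if (!c) = true then x else 0) = (if c = true then 0 else x) := by
    intro c x; cases c <;> simp
  simp only [flip, add_zero]

-- B's value, as the count-weighted sum over the distinct strings
theorem pv_B_eq (r : List String) :
    fin_num_alt r
    = ((PySem.Set.ofList r).map (fun k => (r.count k : Int) * pvF k)).sum := by
  unfold fin_num_alt
  simp only [PySem.Dict.foldl_insert_getD_add_one_eq_counter, PySem.Dict.items_counter]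
  rw [PySem.List.foldl_add, zero_add, List.map_map]
  congr 1
  apply List.map_congr_left
  intro k _
  simp only [Function.comp]
  rw [pv_inner_B]

-- grouping equal elements: a list sum is the count-weighted sum over distinct elements
theorem pv_group_sum (r : List String) (f : String → Int) :
    (r.map f).sum = ((PySem.Set.ofList r).map (fun k => (r.count k : Int) * f k)).sum := by
  have hfin : (PySem.Set.ofList r).toFinset = r.toFinset := by
    apply Finset.ext
    intro a
    simp [PySem.Set.mem_ofList]
  calc (r.map f).sum
      = ∑ m ∈ r.toFinset, r.count m • f m := Finset.sum_list_map_count r f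
    _ = ∑ m ∈ (PySem.Set.ofList r).toFinset, (fun k => (r.count k : Int) * f k) m := by
        rw [hfin]
        apply Finset.sum_congr rfl
        intro m _
        simp
    _ = ((PySem.Set.ofList r).map (fun k => (r.count k : Int) * f k)).sum :=
        List.sum_toFinset _ (PySem.Set.nodup_ofList r)

-- ===== VERDICT (by name: the statement is the Claim_ definition above) =====
theorem fin_num_spec : Claim_equal_fin_num := by
  intro r _ _
  unfold Spec_fin_num
  rw [pv_A_eq, pv_B_eq, pv_group_sum]
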